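-- pv_equiv track=rewrite | github.com/Ann-Fox/-_-_Python | seminar_4/task3.py | find
-- ===== SOURCE A (Python) =====
-- def find(a, b):
--
--     if a > b:
--         max_num = a
--         min_num = b
--     else:
--         max_num = b
--         min_num = a
--
--     for i in range(2, min_num):
--         if min_num % i == 0 and max_num % i == 0:
--             return i
-- ===== SOURCE B (Python) =====
-- def find(a, b):
--     # gcd, then smallest prime factor of the gcd by trial division to sqrt(gcd)
--     min_num = a if a < b else b
--     if min_num <= 2:
--         return None
--     g = a if a >= 0 else -a
--     r = b if b >= 0 else -b
--     while r:
--         g, r = r, g % r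
--     if g <= 1:
--         return None
--     if g % 2 == 0:
--         p = 2
--     else:
--         p = g
--         i = 3
--         while i * i <= g:
--             if g % i == 0:
--                 p = i
--                 break
--             i += 2
--     return p if p < min_num else None
-- ===== Notes on version B (the rewrite author's own statement) =====
-- stated objective: faster
-- what changed: Instead of scanning every candidate i in [2, min(a,b)), B computes gcd(a,b) by Euclid and finds its smallest prime factor by trial division up to sqrt(gcd), returning it only if it is below min(a,b).
import Mathlib
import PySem

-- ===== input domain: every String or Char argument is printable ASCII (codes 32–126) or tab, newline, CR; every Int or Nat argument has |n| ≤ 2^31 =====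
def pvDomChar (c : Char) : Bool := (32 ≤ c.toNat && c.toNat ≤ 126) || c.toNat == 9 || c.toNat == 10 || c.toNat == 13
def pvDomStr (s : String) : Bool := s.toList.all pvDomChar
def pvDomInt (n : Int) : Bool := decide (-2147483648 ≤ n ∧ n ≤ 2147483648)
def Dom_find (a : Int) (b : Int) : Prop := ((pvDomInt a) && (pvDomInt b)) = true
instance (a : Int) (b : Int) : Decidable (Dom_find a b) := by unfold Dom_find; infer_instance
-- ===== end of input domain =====

-- B replaces A's linear scan over [2, min(a,b)) by Euclid's gcd plus trial division
-- to √gcd for its smallest prime factor: asymptotically faster, same return value.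

-- ===== PORT A =====
-- the for-loop with early return = first element of range(2, min_num) passing the test
def find (a : Int) (b : Int) : Option Int :=
  let max_num := if a > b then a else b
  let min_num := if a > b then b else a
  (PySem.List.pyRange 2 min_num 1).find?
    (fun i => PySem.Int.mod min_num i == 0 && PySem.Int.mod max_num i == 0)

-- ===== PORT B =====
-- 'while r: g, r = r, g % r' from Source B (on the absolute values, so Nat)
def gcdLoop (g : Nat) (r : Nat) : Nat :=
  if r = 0 then g else gcdLoop r (g % r)
termination_by r
decreasing_by exact Nat.mod_lt _ (Nat.pos_of_ne_zero (by assumption))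

-- 'while i*i <= g: if g % i == 0: p=i; break; i += 2' from Source B (break → return i, exit → p stays g)
def spfLoop (g : Nat) (i : Nat) : Nat :=
  if i * i ≤ g then
    if g % i = 0 then i else spfLoop g (i + 2)
  else g
termination_by g + 1 - i
decreasing_by
  have h : i * i ≤ g := by assumption
  rcases Nat.eq_zero_or_pos i with rfl | hpos
  · omega
  · have : i ≤ i * i := Nat.le_mul_of_pos_left i hpos
    omega

def find_alt (a : Int) (b : Int) : Option Int :=
  let min_num := if a < b then a else b
  if min_num ≤ 2 then none
  else
    let g := gcdLoop a.natAbs b.natAbs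
    if g ≤ 1 then none
    else
      let p : Nat := if g % 2 = 0 then 2 else spfLoop g 3
      if (p : Int) < min_num then some (p : Int) else none

-- ===== PRECONDITION & SPEC =====
def Spec_find (a : Int) (b : Int) (out : Option Int) : Prop := out = find_alt a b
instance (a : Int) (b : Int) (out : Option Int) : Decidable (Spec_find a b out) := by unfold Spec_find; infer_instance

-- ===== CLAIM (what is proved, stated in full; the proofs are below) =====
def Claim_equal_find : Prop := ∀ (a : Int) (b : Int), Dom_find a b → Spec_find a b (find a b)

-- ===== LEMMAS AND PROOFS =====

-- gcdLoop is Nat.gcd (with swapped arguments)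
theorem gcdLoop_eq (g r : Nat) : gcdLoop g r = Nat.gcd r g := by
  induction g, r using gcdLoop.induct with
  | case1 g => rw [gcdLoop]; simp
  | case2 g r hr ih =>
    rw [gcdLoop]
    simp only [hr, if_false]
    rw [ih, ← Nat.gcd_rec]

-- spfLoop returns the least divisor ≥ 2 of an odd g ≥ 2, given none exists below i
theorem spfLoop_spec (g i : Nat) (hg : 2 ≤ g) (hodd : g % 2 = 1)
    (_hi : i % 2 = 1) (hi3 : 3 ≤ i)
    (hinv : ∀ d, 2 ≤ d → d < i → ¬ d ∣ g) :
    spfLoop g i ∣ g ∧ 2 ≤ spfLoop g i ∧ ∀ d, 2 ≤ d → d ∣ g → spfLoop g i ≤ d := by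
  induction i using spfLoop.induct g with
  | case1 i hle hdvd =>
    rw [spfLoop, if_pos hle, if_pos hdvd]
    refine ⟨Nat.dvd_of_mod_eq_zero hdvd, by omega, ?_⟩
    intro d hd2 hddvd
    by_contra hlt
    exact hinv d hd2 (by omega) hddvd
  | case2 i hle hdvd ih =>
    rw [spfLoop, if_pos hle, if_neg hdvd]
    refine ih (by omega) (by omega) ?_
    intro d hd2 hdlt hddvd
    rcases Nat.lt_or_ge d i with h | h
    · exact hinv d hd2 h hddvd
    · -- d = i or d = i + 1
      rcases Nat.eq_or_lt_of_le h with rfl | h'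
      · exact hdvd (Nat.mod_eq_zero_of_dvd hddvd)
      · -- d = i + 1, which is even, but g is odd
        have hd : d = i + 1 := by omega
        subst hd
        have h2 : 2 ∣ i + 1 := by omega
        have : 2 ∣ g := h2.trans hddvd
        omega
  | case3 i hgt =>
    rw [spfLoop, if_neg hgt]
    refine ⟨dvd_rfl, hg, ?_⟩
    intro d hd2 hddvd
    by_contra hlt
    push Not at hlt
    obtain ⟨e, he⟩ := hddvd
    have he0 : e ≠ 0 := by rintro rfl; simp at he; omega
    have he1 : e ≠ 1 := by rintro rfl; simp at he; omega
    have he2 : 2 ≤ e := by omega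
    have hdi : i ≤ d := by
      by_contra hdi
      exact hinv d hd2 (by omega) ⟨e, he⟩
    have hei : i ≤ e := by
      by_contra hei
      exact hinv e he2 (by omega) ⟨d, by rw [he, Nat.mul_comm]⟩
    have : i * i ≤ d * e := Nat.mul_le_mul hdi hei
    omega

-- membership form of the find? predicate: a common divisor of a and b below min
theorem predChar (mn mx i : Int) (hi : 2 ≤ i) :
    (PySem.Int.mod mn i == 0 && PySem.Int.mod mx i == 0) = true ↔ i ∣ mn ∧ i ∣ mx := by
  simp [PySem.Int.mod_eq_zero_iff_dvd]

-- find? on an increasing range: none if nothing qualifies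
theorem pyRangeFirst_none (p : Int → Bool) (lo hi : Int)
    (h : ∀ i, lo ≤ i → i < hi → p i = false) :
    (PySem.List.pyRange lo hi 1).find? p = none := by
  rw [List.find?_eq_none]
  intro x hx
  rw [PySem.List.mem_pyRange_one] at hx
  simp [h x hx.1 hx.2]

-- find? on an increasing range: first qualifying element
theorem pyRangeFirst_some (p : Int → Bool) (lo hi j : Int)
    (hj1 : lo ≤ j) (hj2 : j < hi) (hp : p j = true)
    (hmin : ∀ k, lo ≤ k → k < j → p k = false) :
    (PySem.List.pyRange lo hi 1).find? p = some j := by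
  rw [PySem.List.pyRange_one_append lo j hi hj1 (by omega), List.find?_append]
  have h1 : (PySem.List.pyRange lo j 1).find? p = none :=
    pyRangeFirst_none p lo j hmin
  rw [h1, Option.none_or]
  rw [PySem.List.pyRange_one_cons (by omega : j < hi)]
  simp [List.find?, hp]

-- a Nat i ≥ 1 divides both a and b iff it divides gcdLoop |a| |b|
theorem dvd_gcdLoop_iff (a b : Int) (i : Nat) :
    (i ∣ gcdLoop a.natAbs b.natAbs) ↔ ((i : Int) ∣ a ∧ (i : Int) ∣ b) := by
  rw [gcdLoop_eq, Nat.gcd_comm]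
  rw [Nat.dvd_gcd_iff]
  rw [← Int.natAbs_dvd_natAbs, ← Int.natAbs_dvd_natAbs (a := (i : Int)) (b := b)]
  simp

-- main equivalence, stated directly on the two ports
theorem ports_agree (a b : Int) : find a b = find_alt a b := by
  unfold find find_alt
  simp only
  set mn : Int := if a > b then b else a with hmn
  set mx : Int := if a > b then a else b with hmx
  have hmn' : (if a < b then a else b) = mn := by
    rw [hmn]; split_ifs <;> omega
  rw [hmn']
  by_cases hsmall : mn ≤ 2
  · rw [if_pos hsmall]
    apply pyRangeFirst_none
    intro i h1 h2; omega
  · rw [if_neg hsmall]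
    push Not at hsmall
    set g := gcdLoop a.natAbs b.natAbs with hg
    -- a common-divisor characterisation through mn/mx
    have hdvd_iff : ∀ i : Nat, ((i : Int) ∣ mn ∧ (i : Int) ∣ mx) ↔ i ∣ g := by
      intro i
      rw [hg, dvd_gcdLoop_iff]
      rcases le_or_gt a b with h | h
      · simp [hmn, hmx, not_lt_of_ge h]
      · simp [hmn, hmx, h]; tauto
    have hgne : g ≠ 0 := by
      intro h0
      rw [hg, gcdLoop_eq] at h0
      obtain ⟨hb0, ha0⟩ := Nat.gcd_eq_zero_iff.mp h0
      have ha : a = 0 := Int.natAbs_eq_zero.mp ha0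
      have hb : b = 0 := Int.natAbs_eq_zero.mp hb0
      rw [hmn, ha, hb] at hsmall
      simp at hsmall
    by_cases hg1 : g ≤ 1
    · rw [if_pos hg1]
      apply pyRangeFirst_none
      intro i h1 h2
      rw [Bool.eq_false_iff]
      intro hp
      rw [predChar mn mx i h1] at hp
      have hdg := (hdvd_iff i.toNat).mp (by
        rw [Int.toNat_of_nonneg (by omega)]; exact hp)
      have : i.toNat ≤ 1 := (Nat.le_of_dvd (by omega) hdg).trans hg1
      omega
    · rw [if_neg hg1]
      push Not at hg1
      -- p = least divisor ≥ 2 of g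
      set p : Nat := if g % 2 = 0 then 2 else spfLoop g 3 with hp
      have hpspec : p ∣ g ∧ 2 ≤ p ∧ ∀ d, 2 ≤ d → d ∣ g → p ≤ d := by
        by_cases h2 : g % 2 = 0
        · simp only [hp, if_pos h2]
          exact ⟨Nat.dvd_of_mod_eq_zero h2, le_refl 2, fun d hd _ => hd⟩
        · simp only [hp, if_neg h2]
          exact spfLoop_spec g 3 (by omega) (by omega) (by norm_num) (le_refl 3)
            (fun d hd2 hd3 => by
              interval_cases d
              intro hdvd
              exact h2 (Nat.mod_eq_zero_of_dvd hdvd))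
      obtain ⟨hpdvd, hp2, hpmin⟩ := hpspec
      -- every qualifying i is ≥ p; p qualifies (divides both)
      have hpboth : ((p : Int) ∣ mn ∧ (p : Int) ∣ mx) := (hdvd_iff p).mpr hpdvd
      by_cases hcmp : (p : Int) < mn
      · rw [if_pos hcmp]
        apply pyRangeFirst_some _ _ _ _ (by exact_mod_cast hp2) hcmp
          ((predChar mn mx p (by exact_mod_cast hp2)).mpr hpboth)
        intro k h1 h2
        rw [Bool.eq_false_iff]
        intro hk
        rw [predChar mn mx k h1] at hk
        have hkg := (hdvd_iff k.toNat).mp (by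
          rw [Int.toNat_of_nonneg (by omega)]; exact hk)
        have := hpmin k.toNat (by omega) hkg
        omega
      · rw [if_neg hcmp]
        apply pyRangeFirst_none
        intro i h1 h2
        rw [Bool.eq_false_iff]
        intro hi
        rw [predChar mn mx i h1] at hi
        have hig := (hdvd_iff i.toNat).mp (by
          rw [Int.toNat_of_nonneg (by omega)]; exact hi)
        have := hpmin i.toNat (by omega) hig
        omega

-- ===== VERDICT (by name: the statement is the Claim_ definition above) =====
theorem find_spec : Claim_equal_find := by
  intro a b _
  unfold Spec_find
  exact ports_agree a b
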